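-- pv_equiv track=rewrite | github.com/seamuss1/Thorium_Molten_Salt_Reactor | src/thorium_reactor/flow/primary_system.py | _pick_loop_start_component
-- ===== SOURCE A (Python) =====
-- from typing import Any
--
-- def _pick_loop_start_component(
--     components: dict[str, dict[str, Any]],
--     outgoing: dict[str, list[dict[str, Any]]],
-- ) -> str:
--     for preferred_kind in ("heat_sink", "pump", "heat_source"):
--         for component_id, component in components.items():
--             if component.get("kind") == preferred_kind and outgoing.get(component_id):
--                 return component_id
--     for component_id in components:
--         if outgoing.get(component_id):
--             return component_id
--     return next(iter(components), "")
-- ===== SOURCE B (Python) =====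
-- def _pick_loop_start_component(components, outgoing):
--     first_by_kind = {}
--     first_with_outgoing = None
--     first_any = None
--     for component_id, component in components.items():
--         if first_any is None:
--             first_any = component_id
--         if outgoing.get(component_id):
--             if first_with_outgoing is None:
--                 first_with_outgoing = component_id
--             kind = component.get("kind")
--             if kind in ("heat_sink", "pump", "heat_source") and kind not in first_by_kind:
--                 first_by_kind[kind] = component_id
--     for kind in ("heat_sink", "pump", "heat_source"):
--         if kind in first_by_kind:
--             return first_by_kind[kind]
--     if first_with_outgoing is not None:
--         return first_with_outgoing
--     if first_any is not None:
--         return first_any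
--     return ""
-- ===== Notes on version B (the rewrite author's own statement) =====
-- stated objective: alternative
-- what changed: Replaces A's three preference scans over the dict plus a fallback scan (up to four passes) by a single pass that records the first id per preferred kind with truthy outgoing, the first id with truthy outgoing, and the first id overall, then selects among them.
import Mathlib
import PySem

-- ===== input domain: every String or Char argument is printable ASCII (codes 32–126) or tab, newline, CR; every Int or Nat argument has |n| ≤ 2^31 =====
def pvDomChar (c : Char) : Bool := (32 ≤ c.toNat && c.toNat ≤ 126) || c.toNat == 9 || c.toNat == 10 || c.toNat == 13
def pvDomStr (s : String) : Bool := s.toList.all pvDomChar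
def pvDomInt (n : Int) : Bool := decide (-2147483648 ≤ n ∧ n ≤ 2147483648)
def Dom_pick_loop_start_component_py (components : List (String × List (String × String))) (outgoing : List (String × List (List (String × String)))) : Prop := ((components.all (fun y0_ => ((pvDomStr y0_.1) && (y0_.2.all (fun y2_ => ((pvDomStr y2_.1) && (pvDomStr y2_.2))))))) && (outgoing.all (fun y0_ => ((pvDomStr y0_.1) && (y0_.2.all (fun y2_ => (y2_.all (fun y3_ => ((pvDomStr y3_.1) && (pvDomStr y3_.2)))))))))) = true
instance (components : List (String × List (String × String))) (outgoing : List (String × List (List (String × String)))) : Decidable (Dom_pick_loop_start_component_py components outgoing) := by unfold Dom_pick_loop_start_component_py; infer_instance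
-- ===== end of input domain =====

-- B replaces A's up-to-four scans over the components dict by ONE pass that records the
-- first id per preferred kind (with truthy outgoing), the first id with truthy outgoing,
-- and the first id overall, then selects among them (objective: alternative, same O(n) cost).

-- ===== PORT A =====
-- truthiness of `outgoing.get(component_id)` (shared expression of both Pythons)
def pvOutTruthy (outgoing : List (String × List (List (String × String)))) (cid : String) : Bool :=
  match (PySem.Dict.mk outgoing).get? cid with
  | some l => !l.isEmpty
  | none => false

-- `component.get("kind")`
def pvKindOf (comp : List (String × String)) : Option String :=
  (PySem.Dict.mk comp).get? "kind"

-- inner loop of A for one preferred kind: first component of that kind with truthy outgoing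
def pvA_scanKind (components : List (String × List (String × String))) (outgoing : List (String × List (List (String × String)))) (k : String) : Option String :=
  components.findSome? (fun p => if pvKindOf p.2 == some k && pvOutTruthy outgoing p.1 then some p.1 else none)

-- A's second loop: first component with truthy outgoing
def pvA_scanOut (components : List (String × List (String × String))) (outgoing : List (String × List (List (String × String)))) : Option String :=
  components.findSome? (fun p => if pvOutTruthy outgoing p.1 then some p.1 else none)

def pick_loop_start_component_py (components : List (String × List (String × String))) (outgoing : List (String × List (List (String × String)))) : String :=
  match ["heat_sink", "pump", "heat_source"].findSome? (pvA_scanKind components outgoing) with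
  | some cid => cid
  | none =>
    match pvA_scanOut components outgoing with
    | some cid => cid
    | none =>
      -- next(iter(components), "")
      match components with
      | [] => ""
      | p :: _ => p.1

-- ===== PORT B =====
-- loop body of Source B: state = (first_by_kind, first_with_outgoing, first_any)
def pvB_step (outgoing : List (String × List (List (String × String)))) (st : PySem.Dict String String × Option String × Option String) (p : String × List (String × String)) : PySem.Dict String String × Option String × Option String :=
  let fa : Option String := match st.2.2 with | none => some p.1 | some x => some x
  if pvOutTruthy outgoing p.1 then
    let fwo : Option String := match st.2.1 with | none => some p.1 | some x => some x
    let fbk : PySem.Dict String String :=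
      match pvKindOf p.2 with
      | some k =>
        if (k == "heat_sink" || k == "pump" || k == "heat_source") && !(st.1.contains k) then
          st.1.insert k p.1
        else st.1
      | none => st.1
    (fbk, fwo, fa)
  else (st.1, st.2.1, fa)

def pick_loop_start_component_py_alt (components : List (String × List (String × String))) (outgoing : List (String × List (List (String × String)))) : String :=
  let st := components.foldl (pvB_step outgoing) (PySem.Dict.empty, none, none)
  match ["heat_sink", "pump", "heat_source"].findSome? (fun k => st.1.get? k) with
  | some cid => cid
  | none =>
    match st.2.1 with
    | some cid => cid
    | none =>
      match st.2.2 with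
      | some cid => cid
      | none => ""

-- ===== PRECONDITION & SPEC =====
def Spec_pick_loop_start_component_py (components : List (String × List (String × String))) (outgoing : List (String × List (List (String × String)))) (out : String) : Prop := out = pick_loop_start_component_py_alt components outgoing
instance (components : List (String × List (String × String))) (outgoing : List (String × List (List (String × String)))) (out : String) : Decidable (Spec_pick_loop_start_component_py components outgoing out) := by unfold Spec_pick_loop_start_component_py; infer_instance

-- ===== CLAIM (what is proved, stated in full; the proofs are below) =====
def Claim_equal_pick_loop_start_component_py : Prop := ∀ (components : List (String × List (String × String))) (outgoing : List (String × List (List (String × String)))), Dom_pick_loop_start_component_py components outgoing → Spec_pick_loop_start_component_py components outgoing (pick_loop_start_component_py components outgoing)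

-- ===== LEMMAS AND PROOFS =====

-- first_by_kind after the loop: for each preferred kind, the earlier of what the state already
-- held and A's scan for that kind over the remaining list
lemma pvB_loop_fbk (outgoing : List (String × List (List (String × String)))) (l : List (String × List (String × String))) (st : PySem.Dict String String × Option String × Option String) (k : String) (hk : k = "heat_sink" ∨ k = "pump" ∨ k = "heat_source") :
    (l.foldl (pvB_step outgoing) st).1.get? k = (st.1.get? k).or (pvA_scanKind l outgoing k) := by
  induction l generalizing st with
  | nil => simp [pvA_scanKind]
  | cons p l ih =>
    rw [List.foldl_cons, ih]
    have hscan : pvA_scanKind (p :: l) outgoing k =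
        (if pvKindOf p.2 == some k && pvOutTruthy outgoing p.1 then some p.1 else none).or (pvA_scanKind l outgoing k) := by
      rw [pvA_scanKind, List.findSome?_cons]
      by_cases hc : (pvKindOf p.2 == some k && pvOutTruthy outgoing p.1) = true
      · rw [if_pos hc]; rfl
      · rw [if_neg hc, Option.none_or]; rfl
    rw [hscan]
    by_cases hout : pvOutTruthy outgoing p.1
    · simp only [pvB_step, hout, if_true]
      cases hkind : pvKindOf p.2 with
      | none =>
        simp [Option.or_assoc]
      | some k' =>
        by_cases hkk : k' = k
        · subst hkk
          have hmem : (k' == "heat_sink" || k' == "pump" || k' == "heat_source") = true := by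
            rcases hk with h | h | h <;> simp [h]
          simp only [hmem, Bool.true_and]
          by_cases hcont : st.1.contains k'
          · have : (st.1.get? k').isSome := by rw [← PySem.Dict.contains_eq_isSome_get?]; exact hcont
            obtain ⟨v, hv⟩ := Option.isSome_iff_exists.mp this
            simp [hcont, hv]
          · have hnone : st.1.get? k' = none := by
              cases h : st.1.get? k' with
              | none => rfl
              | some v => exact absurd (by rw [PySem.Dict.contains_eq_isSome_get?, h]; rfl) hcont
            have hcf : st.1.contains k' = false := by
              cases h : st.1.contains k'
              · rfl
              · exact absurd h hcont
            simp [hcf, hnone, PySem.Dict.get?_insert_self]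
        · have hc : (pvKindOf p.2 == some k && pvOutTruthy outgoing p.1) = false := by
            simp [hkind, hkk]
          simp only [hc, Bool.false_eq_true, if_false, Option.none_or]
          by_cases hins : ((k' == "heat_sink" || k' == "pump" || k' == "heat_source") && !(st.1.contains k')) = true
          · rw [if_pos hins, PySem.Dict.get?_insert, if_neg (fun h => hkk h.symm)]
            simp [hkk]
          · rw [if_neg hins]
            simp [hkk]
    · simp only [pvB_step, hout]
      simp [Option.or_assoc]

-- first_with_outgoing after the loop
lemma pvB_loop_fwo (outgoing : List (String × List (List (String × String)))) (l : List (String × List (String × String))) (st : PySem.Dict String String × Option String × Option String) :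
    (l.foldl (pvB_step outgoing) st).2.1 = (st.2.1).or (pvA_scanOut l outgoing) := by
  induction l generalizing st with
  | nil => simp [pvA_scanOut]
  | cons p l ih =>
    rw [List.foldl_cons, ih]
    have hscan : pvA_scanOut (p :: l) outgoing =
        (if pvOutTruthy outgoing p.1 then some p.1 else none).or (pvA_scanOut l outgoing) := by
      rw [pvA_scanOut, List.findSome?_cons]
      by_cases hc : pvOutTruthy outgoing p.1 = true
      · rw [if_pos hc]; rfl
      · rw [if_neg hc, Option.none_or]; rfl
    rw [hscan]
    by_cases hout : pvOutTruthy outgoing p.1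
    · simp only [pvB_step, hout, if_true]
      cases st.2.1 <;> simp
    · simp only [pvB_step, hout]
      simp [Option.or_assoc]

-- first_any after the loop
lemma pvB_loop_fa (outgoing : List (String × List (List (String × String)))) (l : List (String × List (String × String))) (st : PySem.Dict String String × Option String × Option String) :
    (l.foldl (pvB_step outgoing) st).2.2 = (st.2.2).or (l.head?.map (·.1)) := by
  induction l generalizing st with
  | nil => simp
  | cons p l ih =>
    rw [List.foldl_cons, ih]
    by_cases hout : pvOutTruthy outgoing p.1
    · simp only [pvB_step, hout, if_true]
      cases st.2.2 <;> simp
    · simp only [pvB_step, hout]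
      cases st.2.2 <;> simp

-- ===== VERDICT (by name: the statement is the Claim_ definition above) =====
theorem pick_loop_start_component_py_spec : Claim_equal_pick_loop_start_component_py := by
  unfold Claim_equal_pick_loop_start_component_py
  intro components outgoing _
  unfold Spec_pick_loop_start_component_py
  unfold pick_loop_start_component_py pick_loop_start_component_py_alt
  have hhs := pvB_loop_fbk outgoing components (PySem.Dict.empty, none, none) "heat_sink" (Or.inl rfl)
  have hpu := pvB_loop_fbk outgoing components (PySem.Dict.empty, none, none) "pump" (Or.inr (Or.inl rfl))
  have hso := pvB_loop_fbk outgoing components (PySem.Dict.empty, none, none) "heat_source" (Or.inr (Or.inr rfl))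
  have hwo := pvB_loop_fwo outgoing components (PySem.Dict.empty, none, none)
  have hfa := pvB_loop_fa outgoing components (PySem.Dict.empty, none, none)
  simp only [PySem.Dict.get?_empty, Option.none_or] at hhs hpu hso hwo hfa
  simp only [List.findSome?_cons, List.findSome?_nil, hhs, hpu, hso, hwo, hfa]
  cases components <;> simp
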